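-- pv_equiv track=rewrite | github.com/raeez/chiral-bar-cobar | compute/lib/w3_bar_extended.py | dim_vbar
-- ===== SOURCE A (Python) =====
-- from typing import Dict, List, Optional, Tuple
--
-- def _partitions_into_parts_geq(n: int, min_part: int) -> List[Tuple[int, ...]]:
--     if n == 0:
--         return [()]
--     if n < min_part:
--         return []
--     result = []
--
--     def backtrack(remaining: int, max_part: int, current: List[int]):
--         if remaining == 0:
--             result.append(tuple(current))
--             return
--         for p in range(min(remaining, max_part), min_part - 1, -1):
--             current.append(p)
--             backtrack(remaining - p, p, current)
--             current.pop()
--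
--     backtrack(n, n, [])
--     return result
--
-- def dim_vbar(h: int) -> int:
--     """Dimension of V-bar at conformal weight h."""
--     if h < 2:
--         return 0
--     count = 0
--     for a in range(0, h + 1):
--         b = h - a
--         count += len(_partitions_into_parts_geq(a, 2)) * len(_partitions_into_parts_geq(b, 3))
--     return count
-- ===== SOURCE B (Python) =====
-- def dim_vbar(h: int) -> int:
--     """Dimension of V-bar at conformal weight h."""
--     if h < 2:
--         return 0
--     dp2 = _count_parts_geq(h, 2)
--     dp3 = _count_parts_geq(h, 3)
--     return sum(dp2[a] * dp3[h - a] for a in range(h + 1))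
--
-- def _count_parts_geq(h: int, minp: int) -> list:
--     # dp[j] = number of partitions of j into parts of size >= minp
--     dp = [1] + [0] * h
--     for k in range(minp, h + 1):
--         for j in range(k, h + 1):
--             dp[j] += dp[j - k]
--     return dp
-- ===== Notes on version B (the rewrite author's own statement) =====
-- stated objective: faster
-- what changed: B replaces A's exhaustive backtracking enumeration of every partition (then taking len()) by two quadratic dynamic-programming tables of restricted partition counts, convolved once.
import Mathlib
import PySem

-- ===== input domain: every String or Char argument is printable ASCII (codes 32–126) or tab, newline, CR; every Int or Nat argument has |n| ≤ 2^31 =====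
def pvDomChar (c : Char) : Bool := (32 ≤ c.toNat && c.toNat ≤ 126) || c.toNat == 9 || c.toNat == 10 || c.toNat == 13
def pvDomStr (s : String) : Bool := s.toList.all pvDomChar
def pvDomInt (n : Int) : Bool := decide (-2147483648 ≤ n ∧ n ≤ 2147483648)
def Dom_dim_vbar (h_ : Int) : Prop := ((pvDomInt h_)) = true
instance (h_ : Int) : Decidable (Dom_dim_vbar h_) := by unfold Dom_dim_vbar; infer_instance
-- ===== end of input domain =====

-- B replaces A's explicit enumeration of every partition by two DP tables of restricted
-- partition counts convolved once (objective: faster).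

-- ===== PORT A =====
-- fuel only makes the recursion structural; it bounds the depth and is never exhausted
-- on the fuel supplied below, so the Python recursion is reproduced exactly.
def pyBacktrack (minPart : Int) : Nat → Int → Int → List Int → List (List Int)
  | 0, _, _, _ => []
  | fuel+1, remaining, maxPart, current =>
    if remaining = 0 then [current]
    else (PySem.List.pyRange (min remaining maxPart) (minPart - 1) (-1)).flatMap
      (fun p => pyBacktrack minPart fuel (remaining - p) p (current ++ [p]))

def partitionsIntoPartsGeq (n minPart : Int) : List (List Int) :=
  if n = 0 then [[]]
  else if n < minPart then []
  else pyBacktrack minPart (n.toNat + 1) n n []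

def dim_vbar (h_ : Int) : Int :=
  if h_ < 2 then 0
  else (PySem.List.pyRange 0 (h_ + 1) 1).foldl
    (fun count a =>
      count + ((partitionsIntoPartsGeq a 2).length : Int)
            * ((partitionsIntoPartsGeq (h_ - a) 3).length : Int)) 0

-- ===== PORT B =====
def countPartsGeq (h minp : Int) : List Int :=
  let dp : List Int := 1 :: List.replicate h.toNat 0
  (PySem.List.pyRange minp (h + 1) 1).foldl (fun dp k =>
    (PySem.List.pyRange k (h + 1) 1).foldl (fun dp j =>
      dp.set j.toNat (PySem.List.pyGetD dp j 0 + PySem.List.pyGetD dp (j - k) 0)) dp) dp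

def dim_vbar_alt (h_ : Int) : Int :=
  if h_ < 2 then 0
  else
    let dp2 := countPartsGeq h_ 2
    let dp3 := countPartsGeq h_ 3
    (PySem.List.pyRange 0 (h_ + 1) 1).foldl
      (fun acc a => acc + PySem.List.pyGetD dp2 a 0 * PySem.List.pyGetD dp3 (h_ - a) 0) 0

-- ===== PRECONDITION & SPEC =====
def Spec_dim_vbar (h_ : Int) (out : Int) : Prop := out = dim_vbar_alt h_
instance (h_ : Int) (out : Int) : Decidable (Spec_dim_vbar h_ out) := by unfold Spec_dim_vbar; infer_instance

-- ===== CLAIM (what is proved, stated in full; the proofs are below) =====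
def Claim_equal_dim_vbar : Prop := ∀ (h_ : Int), Dom_dim_vbar h_ → Spec_dim_vbar h_ (dim_vbar h_)

-- ===== LEMMAS AND PROOFS =====

-- pcount minp j k = number of partitions of j into parts p with minp ≤ p ≤ k
-- (the common mathematical value both programs compute).
def pcount (minp : Nat) : Nat → Nat → Nat
  | 0, _ => 1
  | _+1, 0 => 0
  | j+1, k+1 =>
    pcount minp (j+1) k +
      (if minp ≤ k+1 ∧ k+1 ≤ j+1 then pcount minp (j-k) (k+1) else 0)
  termination_by j k => (j, k)

lemma pcount_zero (minp k : Nat) : pcount minp 0 k = 1 := by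
  cases k <;> simp [pcount]

lemma pcount_pos_zero {minp j : Nat} (hj : 0 < j) : pcount minp j 0 = 0 := by
  cases j with
  | zero => omega
  | succ j' => simp [pcount]

lemma pcount_succ_eq {minp j k : Nat} (h : ¬ (minp ≤ k + 1 ∧ k + 1 ≤ j)) :
    pcount minp j (k + 1) = pcount minp j k := by
  cases j with
  | zero => rw [pcount_zero, pcount_zero]
  | succ j' => rw [pcount, if_neg h, Nat.add_zero]

lemma pcount_of_lt_minp {minp : Nat} (k : Nat) {j : Nat} (hj : 0 < j) (hk : k < minp) :
    pcount minp j k = 0 := by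
  induction k with
  | zero => exact pcount_pos_zero hj
  | succ k' ih =>
    rw [pcount_succ_eq (by omega)]
    exact ih (by omega)

lemma pcount_high {minp : Nat} (k : Nat) : ∀ {j : Nat}, j ≤ k →
    pcount minp j k = pcount minp j j := by
  induction k with
  | zero =>
    intro j hj
    have : j = 0 := by omega
    subst this; rfl
  | succ k' ih =>
    intro j hj
    rcases Nat.lt_or_ge j (k' + 1) with h | h
    · rw [pcount_succ_eq (by omega)]; exact ih (by omega)
    · have : j = k' + 1 := by omega
      subst this; rfl

lemma pcount_min_right (minp j k : Nat) :
    pcount minp j (min j k) = pcount minp j k := by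
  rcases Nat.le_total j k with h | h
  · rw [Nat.min_eq_left h, pcount_high k h]
  · rw [Nat.min_eq_right h]

lemma pcount_step {minp j k : Nat} (h1 : 1 ≤ k) (h2 : minp ≤ k) (h3 : k ≤ j) :
    pcount minp j k = pcount minp j (k - 1) + pcount minp (j - k) k := by
  obtain ⟨k', rfl⟩ : ∃ k', k = k' + 1 := ⟨k - 1, by omega⟩
  obtain ⟨j', rfl⟩ : ∃ j', j = j' + 1 := ⟨j - 1, by omega⟩
  rw [pcount]
  rw [if_pos ⟨h2, h3⟩]
  simp only [Nat.add_sub_cancel]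
  congr 2
  omega

-- largest-part decomposition of pcount, in the list-sum form A's recursion produces
lemma pcount_sum {minp : Nat} (hm : 1 ≤ minp) {n : Nat} (hn : 0 < n) (m : Nat) :
    pcount minp n m =
      ((List.range (min n m + 1 - minp)).map
        (fun t => pcount minp (n - (minp + t)) (minp + t))).sum := by
  induction m with
  | zero =>
    have h0 : min n 0 + 1 - minp = 0 := by omega
    rw [h0]
    simpa using pcount_pos_zero hn
  | succ m ih =>
    by_cases hc : minp ≤ m + 1 ∧ m + 1 ≤ n
    · rw [pcount_step (by omega) hc.1 hc.2]
      simp only [Nat.add_sub_cancel]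
      rw [ih]
      have ht : min n (m + 1) + 1 - minp = (min n m + 1 - minp) + 1 := by omega
      rw [ht, List.range_succ, List.map_append, List.sum_append]
      have hx : minp + (min n m + 1 - minp) = m + 1 := by omega
      simp [hx]
    · rw [pcount_succ_eq hc, ih]
      have he : min n (m + 1) + 1 - minp = min n m + 1 - minp := by omega
      rw [he]

lemma lenBT {minp : Int} (hm : 1 ≤ minp) :
    ∀ (fuel : Nat) (rem maxp : Int) (cur : List Int), 0 ≤ rem → 0 ≤ maxp →
      rem.toNat < fuel →
      (pyBacktrack minp fuel rem maxp cur).length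
        = pcount minp.toNat rem.toNat (min rem.toNat maxp.toNat) := by
  intro fuel
  induction fuel with
  | zero => intro rem maxp cur h1 h2 h3; omega
  | succ f ih =>
    intro rem maxp cur h1 h2 h3
    simp only [pyBacktrack]
    by_cases h0 : rem = 0
    · subst h0
      simp [pcount_zero]
    · rw [if_neg h0]
      have hrem : 0 < rem := lt_of_le_of_ne h1 (Ne.symm h0)
      rw [List.length_flatMap, PySem.List.pyRange_neg_one_eq_reverse,
        show minp - 1 + 1 = minp by ring, List.map_reverse, List.sum_reverse,
        PySem.List.pyRange_one, List.map_map]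
      rw [pcount_sum (by omega) (by omega) (min rem.toNat maxp.toNat)]
      have ht : (min rem maxp + 1 - minp).toNat
          = min rem.toNat (min rem.toNat maxp.toNat) + 1 - minp.toNat := by omega
      rw [ht]
      congr 1
      apply List.map_congr_left
      intro k hk
      rw [List.mem_range] at hk
      have hple : minp + (k : Int) ≤ min rem maxp := by omega
      simp only [Function.comp]
      rw [ih (rem - (minp + (k:Int))) (minp + (k:Int)) (cur ++ [minp + (k:Int)])
        (by omega) (by omega) (by omega)]
      have e1 : (rem - (minp + (k:Int))).toNat = rem.toNat - (minp.toNat + k) := by omega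
      have e2 : (minp + (k:Int)).toNat = minp.toNat + k := by omega
      rw [e1, e2, pcount_min_right]

lemma lenPartitions {n minp : Int} (hm : 1 ≤ minp) (hn : 0 ≤ n) :
    (partitionsIntoPartsGeq n minp).length = pcount minp.toNat n.toNat n.toNat := by
  unfold partitionsIntoPartsGeq
  by_cases h0 : n = 0
  · subst h0; simp [pcount_zero]
  · rw [if_neg h0]
    by_cases h1 : n < minp
    · rw [if_pos h1]
      have := pcount_of_lt_minp (minp := minp.toNat) n.toNat (j := n.toNat) (by omega) (by omega)
      simp [this]
    · rw [if_neg h1]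
      rw [lenBT hm (n.toNat + 1) n n [] hn hn (by omega)]
      congr 1
      omega

-- the DP table B maintains, as a closed form
def dpOf (minp K h' : Nat) : List Int :=
  (List.range (h' + 1)).map (fun i => (pcount minp i K : Int))

-- the table in the middle of B's inner loop for part k, positions below jn updated
def dpMix (minp k h' jn : Nat) : List Int :=
  (List.range (h' + 1)).map
    (fun i => if i < jn then (pcount minp i k : Int) else (pcount minp i (k - 1) : Int))

lemma dpMix_low {minp k h' : Nat} (hk : 1 ≤ k) {jn : Nat} (hj : jn ≤ k) :
    dpOf minp (k - 1) h' = dpMix minp k h' jn := by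
  unfold dpOf dpMix
  apply List.map_congr_left
  intro i hi
  rw [List.mem_range] at hi
  by_cases hij : i < jn
  · have e : pcount minp i k = pcount minp i (k - 1) := by
      have e' := pcount_succ_eq (minp := minp) (j := i) (k := k - 1) (by omega)
      rwa [show k - 1 + 1 = k by omega] at e'
    rw [if_pos hij, e]
  · rw [if_neg hij]

lemma dpMix_top {minp k h' : Nat} {jn : Nat} (hj : h' < jn) :
    dpMix minp k h' jn = dpOf minp k h' := by
  unfold dpOf dpMix
  apply List.map_congr_left
  intro i hi
  rw [List.mem_range] at hi
  rw [if_pos (by omega)]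

lemma dpMix_set {minp k' h' : Nat} {h k j : Int} (hm : 1 ≤ minp) (hk : (minp : Int) ≤ k)
    (hkh : k ≤ h) (hjk : k ≤ j) (hjh : j ≤ h) (ek : k.toNat = k') (eh : h.toNat = h') :
    (dpMix minp k' h' j.toNat).set j.toNat
        (PySem.List.pyGetD (dpMix minp k' h' j.toNat) j 0
          + PySem.List.pyGetD (dpMix minp k' h' j.toNat) (j - k) 0)
      = dpMix minp k' h' (j.toNat + 1) := by
  have hk1 : (1 : Int) ≤ k := by omega
  have hgj : PySem.List.pyGetD (dpMix minp k' h' j.toNat) j 0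
      = (pcount minp j.toNat (k' - 1) : Int) := by
    rw [PySem.List.pyGetD_of_nonneg _ _ (by omega)]
    unfold dpMix
    rw [PySem.List.getD_map_range _ _ _ _ (by omega)]
    rw [if_neg (by omega)]
  have hgjk : PySem.List.pyGetD (dpMix minp k' h' j.toNat) (j - k) 0
      = (pcount minp (j.toNat - k') k' : Int) := by
    rw [PySem.List.pyGetD_of_nonneg _ _ (by omega)]
    unfold dpMix
    rw [PySem.List.getD_map_range _ _ _ _ (by omega)]
    rw [if_pos (by omega)]
    rw [show (j - k).toNat = j.toNat - k' by omega]
  rw [hgj, hgjk]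
  have hstep : pcount minp j.toNat k'
      = pcount minp j.toNat (k' - 1) + pcount minp (j.toNat - k') k' :=
    pcount_step (by omega) (by omega) (by omega)
  unfold dpMix
  apply List.ext_getElem
  · simp
  · intro i hi1 hi2
    rw [List.getElem_set]
    by_cases hij : j.toNat = i
    · rw [if_pos hij]
      rw [List.getElem_map, List.getElem_range]
      rw [if_pos (by omega)]
      rw [← hij, hstep]
      push_cast
      ring
    · rw [if_neg hij]
      rw [List.getElem_map, List.getElem_range, List.getElem_map, List.getElem_range]
      by_cases hlt : i < j.toNat
      · rw [if_pos hlt, if_pos (by omega)]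
      · rw [if_neg hlt, if_neg (by omega)]

lemma innerFold {minp : Nat} {h k : Int} (hm : 1 ≤ minp) (hmk : (minp : Int) ≤ k)
    (hkh : k ≤ h) :
    ∀ (c : Nat) (j : Int), k ≤ j → j + c = h + 1 →
      (PySem.List.pyRange j (h + 1) 1).foldl
        (fun dp j => dp.set j.toNat
          (PySem.List.pyGetD dp j 0 + PySem.List.pyGetD dp (j - k) 0))
        (dpMix minp k.toNat h.toNat j.toNat)
      = dpOf minp k.toNat h.toNat := by
  intro c
  induction c with
  | zero =>
    intro j hj1 hj2
    rw [PySem.List.pyRange_one_eq_nil (by omega)]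
    rw [List.foldl_nil]
    exact dpMix_top (by omega)
  | succ c ih =>
    intro j hj1 hj2
    rw [PySem.List.pyRange_one_cons (by omega)]
    rw [List.foldl_cons]
    rw [dpMix_set hm hmk hkh hj1 (by omega) rfl rfl]
    rw [show j.toNat + 1 = (j + 1).toNat by omega]
    exact ih (j + 1) (by omega) (by omega)

lemma outerFold {minp : Nat} {h : Int} (hm : 1 ≤ minp) (h0 : 0 ≤ h) :
    ∀ (c : Nat) (k : Int), (minp : Int) ≤ k → k + c = h + 1 →
      (PySem.List.pyRange k (h + 1) 1).foldl
        (fun dp k =>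
          (PySem.List.pyRange k (h + 1) 1).foldl
            (fun dp j => dp.set j.toNat
              (PySem.List.pyGetD dp j 0 + PySem.List.pyGetD dp (j - k) 0)) dp)
        (dpOf minp (k.toNat - 1) h.toNat)
      = dpOf minp h.toNat h.toNat := by
  intro c
  induction c with
  | zero =>
    intro k hk1 hk2
    rw [PySem.List.pyRange_one_eq_nil (by omega)]
    rw [List.foldl_nil]
    congr 1
    omega
  | succ c ih =>
    intro k hk1 hk2
    rw [PySem.List.pyRange_one_cons (by omega)]
    rw [List.foldl_cons]
    rw [dpMix_low (k := k.toNat) (by omega) (le_refl k.toNat)]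
    rw [innerFold hm hk1 (by omega) (c + 1) k (le_refl k) hk2]
    have e := ih (k + 1) (by omega) (by omega)
    rw [show (k + 1).toNat - 1 = k.toNat by omega] at e
    exact e

lemma countPartsGeq_eq {h minp : Int} (hm : 1 ≤ minp) (h0 : 0 ≤ h) (hmh : minp ≤ h + 1) :
    countPartsGeq h minp = dpOf minp.toNat h.toNat h.toNat := by
  show (PySem.List.pyRange minp (h + 1) 1).foldl _ (1 :: List.replicate h.toNat 0)
      = dpOf minp.toNat h.toNat h.toNat
  have hinit : (1 :: List.replicate h.toNat (0:Int)) = dpOf minp.toNat (minp.toNat - 1) h.toNat := by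
    unfold dpOf
    apply List.ext_getElem
    · simp
    · intro i hi1 hi2
      rw [List.getElem_map, List.getElem_range]
      cases i with
      | zero => rw [pcount_zero]; rfl
      | succ i' =>
        rw [pcount_of_lt_minp (minp.toNat - 1) (Nat.succ_pos i') (by omega)]
        simp
  rw [hinit]
  have := outerFold (minp := minp.toNat) (h := h) (by omega) h0 (h + 1 - minp).toNat minp
    (by omega) (by omega)
  exact this

lemma dim_eq (h_ : Int) : dim_vbar h_ = dim_vbar_alt h_ := by
  unfold dim_vbar dim_vbar_alt
  by_cases hlt : h_ < 2
  · simp [hlt]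
  · rw [if_neg hlt, if_neg hlt]
    show _ = (PySem.List.pyRange 0 (h_ + 1) 1).foldl
      (fun acc a => acc + PySem.List.pyGetD (countPartsGeq h_ 2) a 0
        * PySem.List.pyGetD (countPartsGeq h_ 3) (h_ - a) 0) 0
    apply PySem.List.foldl_congr_mem
    intro acc a ha
    rw [PySem.List.mem_pyRange_one] at ha
    congr 1
    rw [countPartsGeq_eq (by omega) (by omega) (by omega),
      countPartsGeq_eq (by omega) (by omega) (by omega)]
    rw [lenPartitions (by omega) ha.1, lenPartitions (by omega) (by omega)]
    rw [PySem.List.pyGetD_of_nonneg _ _ ha.1, PySem.List.pyGetD_of_nonneg _ _ (by omega)]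
    unfold dpOf
    rw [PySem.List.getD_map_range _ _ _ _ (by omega),
      PySem.List.getD_map_range _ _ _ _ (by omega)]
    rw [pcount_high (minp := (2:Int).toNat) h_.toNat (j := a.toNat) (by omega),
      pcount_high (minp := (3:Int).toNat) h_.toNat (j := (h_ - a).toNat) (by omega)]

-- ===== VERDICT (by name: the statement is the Claim_ definition above) =====
theorem dim_vbar_spec : Claim_equal_dim_vbar := by
  intro h_ _
  unfold Spec_dim_vbar
  exact dim_eq h_
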